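-- pv_equiv track=rewrite | github.com/Bertik23/mathscripts | vladSLR.py | get_hodnosti
-- ===== SOURCE A (Python) =====
-- def get_hodnost(data):
--     '''
--         vypočítá hodnost matice
--     '''
--     hodnost = 0
--     for i in data:
--         if i != [0 for j in range(len(i))]:
--             hodnost += 1
--     return hodnost
--
-- def get_hodnosti(data):
--     '''
--         vypočítá hodnosti A a A|b a n
--     '''
--     Ab = data
--     A = []
--     for i in data:
--         A.append(i[:-1])
--     hA = get_hodnost(A)
--     hAb = get_hodnost(Ab)
--     n = len(data[0])-1
--     return hA, hAb, n
-- ===== SOURCE B (Python) =====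
-- def get_hodnosti(data):
--     '''
--         vypočítá hodnosti A a A|b a n — per row, find the index of the FIRST
--         non-zero entry (or len(row) if none); a row of A is zero iff that index
--         is >= len(row)-1, a row of A|b iff it is == len(row). Count the zero
--         rows and subtract from the number of rows.
--     '''
--     zero_pref = 0   # rows whose first len-1 entries are all zero
--     zero_full = 0   # rows that are entirely zero
--     for row in data:
--         k = next((i for i, x in enumerate(row) if x != 0), len(row))
--         if k >= len(row) - 1:
--             zero_pref += 1
--         if k == len(row):
--             zero_full += 1
--     m = len(data)
--     return m - zero_pref, m - zero_full, len(data[0]) - 1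
-- ===== Notes on version B (the rewrite author's own statement) =====
-- stated objective: alternative
-- what changed: B replaces A's three passes (building the sliced matrix and two zero-row-list comparisons per matrix) by one loop that finds each row's first non-zero index with an early-stopping scan, classifies the row against that single index, counts ZERO rows and obtains both ranks by subtracting from the row count.
import Mathlib
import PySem

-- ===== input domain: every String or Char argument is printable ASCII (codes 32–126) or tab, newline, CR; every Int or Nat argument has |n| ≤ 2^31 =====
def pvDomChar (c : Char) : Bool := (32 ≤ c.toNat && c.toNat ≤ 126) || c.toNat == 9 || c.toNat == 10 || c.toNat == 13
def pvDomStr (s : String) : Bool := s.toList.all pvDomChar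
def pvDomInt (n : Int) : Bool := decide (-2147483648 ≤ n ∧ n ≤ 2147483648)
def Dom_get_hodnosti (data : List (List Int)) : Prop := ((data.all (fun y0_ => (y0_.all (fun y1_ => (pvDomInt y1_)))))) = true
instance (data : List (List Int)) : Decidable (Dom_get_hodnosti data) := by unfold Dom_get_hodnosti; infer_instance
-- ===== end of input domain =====

-- B replaces A's three passes (sliced matrix + two zero-row-list comparisons) by one loop that
-- finds each row's first non-zero index and counts zero rows, subtracting from the row count.


-- ===== PORT A =====
-- helper get_hodnost: counts rows i with i != [0 for j in range(len(i))]
def get_hodnost (data : List (List Int)) : Int :=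
  data.foldl
    (fun hodnost i =>
      if i ≠ (PySem.List.pyRange 0 (PySem.List.len i) 1).map (fun _ => (0 : Int))
      then hodnost + 1 else hodnost) 0

def get_hodnosti (data : List (List Int)) : Int × Int × Int :=
  let Ab := data
  let A := data.foldl (fun A i => A ++ [PySem.List.slice i none (some (-1))]) []
  let hA := get_hodnost A
  let hAb := get_hodnost Ab
  let n := PySem.List.len (PySem.List.pyGetD data 0 []) - 1
  (hA, hAb, n)

-- ===== PORT B =====
-- first index whose entry is non-zero, or the row length if none
-- (= next((i for i, x in enumerate(row) if x != 0), len(row)))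
def firstNz (row : List Int) : Nat :=
  match row with
  | [] => 0
  | x :: t => if x ≠ 0 then 0 else firstNz t + 1

def get_hodnosti_alt (data : List (List Int)) : Int × Int × Int :=
  let z := data.foldl
    (fun (z : Int × Int) row =>
      let k := firstNz row
      (z.1 + (if (PySem.List.len row) - 1 ≤ (k : Int) then 1 else 0),
       z.2 + (if (k : Int) = PySem.List.len row then 1 else 0))) (0, 0)
  let m := PySem.List.len data
  (m - z.1, m - z.2, PySem.List.len (PySem.List.pyGetD data 0 []) - 1)

-- ===== PRECONDITION & SPEC =====
-- Pre_ excludes only the empty list, on which A (and B) raises IndexError at data[0].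
def Pre_get_hodnosti (data : List (List Int)) : Prop := data ≠ []
instance (data : List (List Int)) : Decidable (Pre_get_hodnosti data) := by unfold Pre_get_hodnosti; infer_instance
def pvWitness_get_hodnosti : List (List Int) := [[1, 2], [0, 0]]

def Spec_get_hodnosti (data : List (List Int)) (out : Int × Int × Int) : Prop := out = get_hodnosti_alt data
instance (data : List (List Int)) (out : Int × Int × Int) : Decidable (Spec_get_hodnosti data out) := by unfold Spec_get_hodnosti; infer_instance

-- ===== CLAIM (what is proved, stated in full; the proofs are below) =====
def Claim_equal_get_hodnosti : Prop := ∀ (data : List (List Int)), Dom_get_hodnosti data → Pre_get_hodnosti data → Spec_get_hodnosti data (get_hodnosti data)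

-- ===== LEMMAS AND PROOFS =====

theorem firstNz_le_length (l : List Int) : firstNz l ≤ l.length := by
  induction l with
  | nil => simp [firstNz]
  | cons x t ih => simp only [firstNz, List.length_cons]; split <;> omega

-- the first-nonzero index characterises any-nonzero on a prefix
theorem take_any_iff (l : List Int) : ∀ (n : Nat),
    (l.take n).any (fun x => x ≠ 0) = decide (firstNz l < min n l.length) := by
  induction l with
  | nil => intro n; simp
  | cons x t ih =>
    intro n
    cases n with
    | zero => simp
    | succ n =>
      simp only [List.take_succ_cons, List.any_cons, firstNz, List.length_cons]
      by_cases hx : x ≠ 0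
      · simp only [if_pos hx]
        simp [hx]
      · simp only [if_neg hx, ih n]
        rw [Decidable.not_not] at hx
        simp only [hx]
        have := firstNz_le_length t
        by_cases h : firstNz t < min n t.length <;> simp [h] <;> omega

theorem any_iff_firstNz (l : List Int) :
    l.any (fun x => x ≠ 0) = decide (firstNz l < l.length) := by
  have := take_any_iff l l.length
  simpa using this

theorem dropLast_any_iff (l : List Int) :
    l.dropLast.any (fun x => x ≠ 0) = decide (firstNz l < l.length - 1) := by
  have h := take_any_iff l (l.length - 1)
  rw [List.dropLast_eq_take, h]
  have := firstNz_le_length l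
  by_cases hc : firstNz l < l.length - 1 <;> simp [hc]

-- a row differs from its zero row iff some entry is non-zero
theorem row_ne_zero_row_iff (i : List Int) :
    (i ≠ (PySem.List.pyRange 0 (PySem.List.len i) 1).map (fun _ => (0 : Int))) ↔
      i.any (fun x => x ≠ 0) = true := by
  rw [PySem.List.pyRange_one, List.map_map]
  simp only [Function.comp_def, List.map_const']
  constructor
  · intro h
    by_contra hall
    apply h
    simp only [List.any_eq_true, decide_eq_true_eq, not_exists, not_and, ne_eq,
      Decidable.not_not] at hall
    rw [List.eq_replicate_iff]
    constructor
    · simp [PySem.List.len_eq]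
    · exact hall
  · intro h heq
    simp only [List.any_eq_true, decide_eq_true_eq, ne_eq] at h
    obtain ⟨x, hx, hne⟩ := h
    rw [heq] at hx
    exact hne (List.eq_of_mem_replicate hx)

theorem get_hodnost_eq_countP (l : List (List Int)) :
    get_hodnost l = (l.countP (fun i => i.any (fun x => x ≠ 0))) := by
  unfold get_hodnost
  have hf : (fun (hodnost : Int) (i : List Int) =>
        if i ≠ (PySem.List.pyRange 0 (PySem.List.len i) 1).map (fun _ => (0 : Int))
        then hodnost + 1 else hodnost) =
      (fun (hodnost : Int) (i : List Int) =>
        if (i.any (fun x => x ≠ 0)) = true then hodnost + 1 else hodnost) := by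
    funext h i
    by_cases hp : i.any (fun x => x ≠ 0) = true
    · rw [if_pos hp, if_pos ((row_ne_zero_row_iff i).mpr hp)]
    · rw [if_neg hp, if_neg (fun hc => hp ((row_ne_zero_row_iff i).mp hc))]
  rw [hf, PySem.List.foldl_count_if (fun i => i.any (fun x => x ≠ 0)) l 0]
  simp

-- B's fold counts, in each component, rows satisfying the two zero tests
theorem altFold_gen (l : List (List Int)) : ∀ (a b : Int),
    l.foldl
      (fun (z : Int × Int) row =>
        let k := firstNz row
        (z.1 + (if (PySem.List.len row) - 1 ≤ (k : Int) then 1 else 0),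
         z.2 + (if (k : Int) = PySem.List.len row then 1 else 0))) (a, b) =
    (a + (l.countP (fun row => decide ((PySem.List.len row) - 1 ≤ (firstNz row : Int))) : Int),
     b + (l.countP (fun row => decide ((firstNz row : Int) = PySem.List.len row)) : Int)) := by
  induction l with
  | nil => intro a b; simp
  | cons r t ih =>
    intro a b
    simp only [List.foldl_cons, ih, List.countP_cons, Prod.mk.injEq]
    constructor <;> split_ifs <;> simp_all <;> omega

-- complement counting: #(rows failing p) = m - #(rows satisfying p)
theorem countP_not_int {α : Type} (l : List α) (p : α → Bool) :
    ((l.countP fun a => !(p a)) : Int) = (l.length : Int) - (l.countP p : Int) := by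
  induction l with
  | nil => simp
  | cons a t ih =>
    by_cases h : p a = true <;> simp [h, ih] <;> omega

-- ===== VERDICT (by name: the statement is the Claim_ definition above) =====
theorem get_hodnosti_spec : Claim_equal_get_hodnosti := by
  intro data _ _
  unfold Spec_get_hodnosti get_hodnosti get_hodnosti_alt
  rw [PySem.List.foldl_append_singleton_eq_map (fun i => PySem.List.slice i none (some (-1))) data []]
  rw [altFold_gen data 0 0]
  simp only [List.nil_append, get_hodnost_eq_countP, List.countP_map, zero_add,
    Prod.mk.injEq]
  refine ⟨?_, ?_, trivial⟩
  · have hc : ((fun (i : List Int) => i.any fun x => decide (x ≠ 0)) ∘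
          (fun i => PySem.List.slice i none (some (-1)))) =
        (fun (i : List Int) => !(decide ((PySem.List.len i) - 1 ≤ (firstNz i : Int)))) := by
      funext i
      rw [Function.comp, PySem.List.slice_to_neg_one, dropLast_any_iff]
      have := firstNz_le_length i
      simp only [PySem.List.len_eq]
      by_cases h : firstNz i < i.length - 1 <;> simp [h] <;> omega
    rw [hc, countP_not_int]
    simp [PySem.List.len_eq]
  · have hc : (fun (i : List Int) => i.any fun x => decide (x ≠ 0)) =
        (fun (i : List Int) => !(decide ((firstNz i : Int) = PySem.List.len i))) := by
      funext i
      rw [any_iff_firstNz]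
      have := firstNz_le_length i
      simp only [PySem.List.len_eq]
      by_cases h : firstNz i < i.length <;> simp [h] <;> omega
    rw [hc, countP_not_int]
    simp [PySem.List.len_eq]
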